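-- pv_equiv track=rewrite | github.com/JoaquinCampo/NeuralShield | experiments/16_cross_dataset_mi/preprocessing.py | strip_headers
-- ===== SOURCE A (Python) =====
-- def strip_headers(request: str) -> str:
--     """
--     Extract only request line and body, removing HTTP headers.
--
--     This helps focus on attack payloads rather than header artifacts
--     when datasets have synthetic/uniform headers.
--
--     Args:
--         request: Full HTTP request with headers
--
--     Returns:
--         Request line + body (if present)
--     """
--     lines = request.split("\n")
--
--     if not lines:
--         return request
--
--     # First line is always the request line (METHOD URL HTTP/x.x)
--     request_line = lines[0]
--
--     # Find body (after blank line, if POST/PUT)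
--     body = ""
--     found_blank = False
--     for line in lines[1:]:
--         if not line.strip():
--             found_blank = True
--             continue
--         if found_blank:
--             # After blank line = body
--             body += " " + line.strip()
--
--     result = request_line
--     if body:
--         result += " " + body.strip()
--
--     return result
-- ===== SOURCE B (Python) =====
-- def strip_headers(request: str) -> str:
--     """Extract request line and body, dropping HTTP headers (simpler decomposition:
--     locate the first blank separator line, then join the stripped body lines)."""
--     lines = request.split("\n")
--     request_line = lines[0]
--     tail = lines[1:]
--     sep = next((i for i, line in enumerate(tail) if not line.strip()), None)
--     if sep is None:
--         return request_line
--     body = " ".join(p for p in (l.strip() for l in tail[sep + 1:]) if p)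
--     return request_line + " " + body if body else request_line
-- ===== Notes on version B (the rewrite author's own statement) =====
-- stated objective: simpler
-- what changed: Replaces the stateful found_blank/accumulator loop and the final body.strip() by a direct decomposition: find the index of the first blank line, slice the tail after it, and join the stripped non-empty lines with single spaces.
import Mathlib
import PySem

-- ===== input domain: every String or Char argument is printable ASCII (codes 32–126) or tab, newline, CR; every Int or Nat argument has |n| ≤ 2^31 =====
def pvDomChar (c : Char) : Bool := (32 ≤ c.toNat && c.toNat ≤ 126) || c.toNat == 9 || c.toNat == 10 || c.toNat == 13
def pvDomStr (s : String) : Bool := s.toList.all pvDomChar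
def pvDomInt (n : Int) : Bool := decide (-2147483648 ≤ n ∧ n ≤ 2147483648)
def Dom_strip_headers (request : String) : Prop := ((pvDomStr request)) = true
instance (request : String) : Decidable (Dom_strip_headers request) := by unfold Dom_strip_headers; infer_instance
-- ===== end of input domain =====

-- B replaces A's stateful found_blank/accumulator loop (and its final body.strip())
-- by a direct decomposition — find the first blank line, slice, strip-and-join; objective: simpler.

-- ===== PORT A =====
-- the body of A's `for line in lines[1:]` loop, state = (body, found_blank)
def pvLoopA (st : String × Bool) (line : String) : String × Bool :=
  if PySem.Str.strip line = "" then (st.1, true)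
  else if st.2 then (st.1 ++ " " ++ PySem.Str.strip line, st.2)
  else st

def strip_headers (request : String) : String :=
  match PySem.Str.split? request "\n" with
  | none => request            -- unreachable: the separator "\n" is non-empty
  | some [] => request         -- `if not lines: return request` (split never yields [])
  | some (request_line :: rest) =>
      let st := rest.foldl pvLoopA ("", false)
      if st.1 ≠ "" then request_line ++ " " ++ PySem.Str.strip st.1 else request_line

-- ===== PORT B =====
-- B helper: Python's `not line.strip()`
def pvIsBlank (line : String) : Bool := PySem.Str.strip line = ""

-- B helper: `" ".join(p for p in (l.strip() for l in ls) if p)`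
def pvBody (ls : List String) : String :=
  PySem.Str.join " " ((ls.map PySem.Str.strip).filter (fun p => p ≠ ""))

def strip_headers_alt (request : String) : String :=
  match PySem.Str.split? request "\n" with
  | none => request            -- unreachable: the separator "\n" is non-empty
  | some [] => request         -- unreachable: split never yields []
  | some (request_line :: tail) =>
      match tail.findIdx? pvIsBlank with
      | none => request_line
      | some i =>
          let body := pvBody (tail.drop (i + 1))
          if body ≠ "" then request_line ++ " " ++ body else request_line

-- ===== PRECONDITION & SPEC =====
def Spec_strip_headers (request : String) (out : String) : Prop := out = strip_headers_alt request
instance (request : String) (out : String) : Decidable (Spec_strip_headers request out) := by unfold Spec_strip_headers; infer_instance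

-- ===== CLAIM (what is proved, stated in full; the proofs are below) =====
def Claim_equal_strip_headers : Prop := ∀ (request : String), Dom_strip_headers request → Spec_strip_headers request (strip_headers request)

-- ===== LEMMAS AND PROOFS =====

-- char-level shape of A's accumulated body: " p1 p2 … pn"
def pvParts (ls : List String) : List (List Char) :=
  (ls.map (fun l => PySem.Chars.strip l.toList)).filter (fun p => p ≠ [])

def pvBodyA (ls : List String) : String :=
  String.ofList (((pvParts ls).map (fun p => ' ' :: p)).flatten)

-- "first char (if any) is not whitespace" / "last char (if any) is not whitespace"
def pvLOk (cs : List Char) : Prop := ∀ c ∈ cs.head?, PySem.Chars.isspace c = false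
def pvROk (cs : List Char) : Prop := ∀ c ∈ cs.getLast?, PySem.Chars.isspace c = false

theorem pvLOk_lstrip (cs : List Char) : pvLOk (PySem.Chars.lstrip cs) := by
  intro c hc
  have h := List.head?_dropWhile_not PySem.Chars.isspace cs
  simp only [PySem.Chars.lstrip] at hc
  rw [Option.mem_def] at hc
  rw [hc] at h
  exact h

theorem pvROk_rstrip (cs : List Char) : pvROk (PySem.Chars.rstrip cs) := by
  intro c hc
  simp only [PySem.Chars.rstrip, List.getLast?_reverse] at hc
  have h := List.head?_dropWhile_not PySem.Chars.isspace cs.reverse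
  rw [Option.mem_def] at hc
  rw [hc] at h
  exact h

theorem head?_of_prefix {l m : List Char} (h : l <+: m) (hne : l ≠ []) : l.head? = m.head? := by
  obtain ⟨t, rfl⟩ := h
  rw [List.head?_append]
  cases l with
  | nil => exact absurd rfl hne
  | cons a b => rfl

theorem rstrip_prefix (cs : List Char) : PySem.Chars.rstrip cs <+: cs := by
  have h := (List.dropWhile_suffix (l := cs.reverse) PySem.Chars.isspace).reverse
  simpa [PySem.Chars.rstrip] using h

theorem pvLOk_strip (cs : List Char) : pvLOk (PySem.Chars.strip cs) := by
  by_cases hne : PySem.Chars.strip cs = []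
  · intro c hc; simp [hne] at hc
  · intro c hc
    have hpre : PySem.Chars.strip cs <+: PySem.Chars.lstrip cs := by
      simpa [PySem.Chars.strip] using rstrip_prefix (PySem.Chars.lstrip cs)
    have := head?_of_prefix hpre hne
    exact pvLOk_lstrip cs c (by rw [Option.mem_def] at *; rw [← this]; exact hc)

theorem pvROk_strip (cs : List Char) : pvROk (PySem.Chars.strip cs) := by
  simpa [PySem.Chars.strip] using pvROk_rstrip (PySem.Chars.lstrip cs)

theorem lstrip_eq_self (cs : List Char) (h : pvLOk cs) : PySem.Chars.lstrip cs = cs := by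
  cases cs with
  | nil => rfl
  | cons a b =>
      have ha : PySem.Chars.isspace a = false := h a rfl
      simp [PySem.Chars.lstrip, ha]

theorem rstrip_eq_self (cs : List Char) (h : pvROk cs) : PySem.Chars.rstrip cs = cs := by
  have hl : pvLOk cs.reverse := by
    intro c hc
    rw [List.head?_reverse] at hc
    exact h c hc
  have := lstrip_eq_self cs.reverse hl
  simp only [PySem.Chars.rstrip, PySem.Chars.lstrip] at *
  rw [this, List.reverse_reverse]

theorem strip_space_cons (cs : List Char) (hl : pvLOk cs) (hr : pvROk cs) :
    PySem.Chars.strip (' ' :: cs) = cs := by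
  have h1 : PySem.Chars.lstrip (' ' :: cs) = cs := by
    have : PySem.Chars.isspace ' ' = true := by decide
    simp only [PySem.Chars.lstrip, List.dropWhile_cons, this, if_true]
    exact lstrip_eq_self cs hl
  simp only [PySem.Chars.strip, h1]
  exact rstrip_eq_self cs hr

-- the joined body: nonempty, strip-normal at both ends
theorem join_ne (p : List Char) (ps : List (List Char)) (hp : p ≠ []) :
    PySem.Chars.join [' '] (p :: ps) ≠ [] := by
  cases ps with
  | nil => simpa [PySem.Chars.join_singleton] using hp
  | cons q qs =>
      rw [PySem.Chars.join_cons_cons]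
      simp [hp]

theorem join_head? (p : List Char) (ps : List (List Char)) (hp : p ≠ []) :
    (PySem.Chars.join [' '] (p :: ps)).head? = p.head? := by
  cases ps with
  | nil => rw [PySem.Chars.join_singleton]
  | cons q qs =>
      rw [PySem.Chars.join_cons_cons, List.append_assoc, List.head?_append]
      cases p with
      | nil => exact absurd rfl hp
      | cons a b => rfl

theorem join_getLast? (ps : List (List Char)) (h : ∀ p ∈ ps, p ≠ []) (hne : ps ≠ []) :
    ∃ p ∈ ps, (PySem.Chars.join [' '] ps).getLast? = p.getLast? := by
  induction ps with
  | nil => exact absurd rfl hne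
  | cons p rest ih =>
      cases rest with
      | nil => exact ⟨p, by simp, by rw [PySem.Chars.join_singleton]⟩
      | cons q qs =>
          obtain ⟨r, hr, hlast⟩ := ih (fun x hx => h x (List.mem_cons_of_mem _ hx)) (by simp)
          refine ⟨r, List.mem_cons_of_mem _ hr, ?_⟩
          rw [PySem.Chars.join_cons_cons, List.getLast?_append, hlast]
          cases hrr : r.getLast? with
          | none => exact absurd (List.getLast?_eq_none_iff.mp hrr) (h r (List.mem_cons_of_mem _ hr))
          | some c => simp

-- A's loop once found_blank is true only appends
theorem foldl_loopA_found (ls : List String) (acc : String) :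
    ls.foldl pvLoopA (acc, true) = (acc ++ pvBodyA ls, true) := by
  induction ls generalizing acc with
  | nil =>
      have : acc ++ pvBodyA [] = acc := String.toList_inj.mp
        (by simp [pvBodyA, pvParts])
      simp [this]
  | cons l t ih =>
      by_cases hb : PySem.Str.strip l = ""
      · have hb' : PySem.Chars.strip l.toList = [] := by
          have := congrArg String.toList hb
          simpa using this
        simp only [List.foldl_cons, pvLoopA, hb, if_true, ih]
        congr 1
        apply String.toList_inj.mp
        simp [pvBodyA, pvParts, String.toList_ofList, hb']
      · have hb' : PySem.Chars.strip l.toList ≠ [] := by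
          intro h
          apply hb
          apply String.toList_inj.mp
          simpa using h
        simp only [List.foldl_cons, pvLoopA, hb, if_false, if_true, ih]
        congr 1
        apply String.toList_inj.mp
        simp [pvBodyA, pvParts, String.toList_ofList, String.toList_append, hb']

-- before the first blank line A's loop does nothing
theorem foldl_loopA_notfound (ls : List String) (h : ls.findIdx? pvIsBlank = none) :
    ls.foldl pvLoopA ("", false) = ("", false) := by
  induction ls with
  | nil => rfl
  | cons l t ih =>
      rw [List.findIdx?_cons] at h
      by_cases hb : pvIsBlank l = true
      · simp [hb] at h
      · have hb' : ¬ PySem.Str.strip l = "" := by simpa [pvIsBlank] using hb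
        have hbf : pvIsBlank l = false := eq_false_of_ne_true hb
        simp only [hbf, Bool.false_eq_true, if_false] at h
        cases hf : t.findIdx? pvIsBlank with
        | none => simp only [List.foldl_cons, pvLoopA, hb', if_false]; exact ih hf
        | some j => rw [hf] at h; simp at h

-- A's loop from the first blank line on
theorem foldl_loopA_split (ls : List String) (i : Nat) (h : ls.findIdx? pvIsBlank = some i) :
    ls.foldl pvLoopA ("", false) = (ls.drop (i + 1)).foldl pvLoopA ("", true) := by
  induction ls generalizing i with
  | nil => simp at h
  | cons l t ih =>
      rw [List.findIdx?_cons] at h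
      by_cases hb : pvIsBlank l = true
      · have hb' : PySem.Str.strip l = "" := by simpa [pvIsBlank] using hb
        simp only [hb, if_true, Option.some.injEq] at h
        subst h
        simp [pvLoopA, hb']
      · have hb' : ¬ PySem.Str.strip l = "" := by simpa [pvIsBlank] using hb
        have hbf : pvIsBlank l = false := eq_false_of_ne_true hb
        simp only [hbf, Bool.false_eq_true, if_false] at h
        cases hf : t.findIdx? pvIsBlank with
        | none => rw [hf] at h; simp at h
        | some j =>
            rw [hf] at h
            simp only [Option.map_some, Option.some.injEq] at h
            subst h
            simp only [List.foldl_cons, pvLoopA, hb', if_false, List.drop_succ_cons]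
            exact ih j hf

-- bridge: B's joined body, char-level
theorem pvBody_toList (ls : List String) :
    (pvBody ls).toList = PySem.Chars.join [' '] (pvParts ls) := by
  unfold pvBody pvParts
  rw [PySem.Str.toList_join]
  congr 1
  rw [List.filter_map, List.filter_map, List.map_map]
  have hp : ((fun p => decide (p ≠ [])) ∘ (fun l : String => PySem.Chars.strip l.toList))
      = ((fun p => decide (p ≠ "")) ∘ PySem.Str.strip) := by
    funext l
    apply decide_eq_decide.mpr
    show PySem.Chars.strip l.toList ≠ [] ↔ PySem.Str.strip l ≠ ""
    rw [← PySem.Str.toList_strip]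
    constructor
    · intro h hc; exact h (by rw [hc]; rfl)
    · intro h hc; exact h (String.toList_inj.mp (by simpa using hc))
  rw [hp]
  apply List.map_congr_left
  intro l _
  simp [Function.comp]

-- parts are nonempty and strip-normal
theorem pvParts_mem (ls : List String) (p : List Char) (hp : p ∈ pvParts ls) :
    p ≠ [] ∧ pvLOk p ∧ pvROk p := by
  unfold pvParts at hp
  rw [List.mem_filter] at hp
  obtain ⟨hmem, hne⟩ := hp
  rw [List.mem_map] at hmem
  obtain ⟨l, _, rfl⟩ := hmem
  exact ⟨by simpa using hne, pvLOk_strip _, pvROk_strip _⟩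

-- A's body is " " ++ B's joined body, char-level
theorem flatten_space_join (p : List Char) (ps : List (List Char)) :
    ((p :: ps).map (fun q => ' ' :: q)).flatten = ' ' :: PySem.Chars.join [' '] (p :: ps) := by
  induction ps generalizing p with
  | nil => simp [PySem.Chars.join_singleton]
  | cons q qs ih =>
      rw [List.map_cons, List.flatten_cons, ih q, PySem.Chars.join_cons_cons]
      simp

-- the main body identity: strip(A's body) = B's body, and the emptiness tests agree
theorem body_identity (ls : List String) :
    (pvBodyA ls = "" ∧ pvBody ls = "") ∨
    (pvBodyA ls ≠ "" ∧ pvBody ls ≠ "" ∧ PySem.Str.strip (pvBodyA ls) = pvBody ls) := by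
  cases hps : pvParts ls with
  | nil =>
      left
      constructor
      · apply String.toList_inj.mp
        simp [pvBodyA, hps]
      · apply String.toList_inj.mp
        rw [pvBody_toList, hps]
        simp [PySem.Chars.join_nil]
  | cons p rest =>
      right
      have hmem : ∀ q ∈ p :: rest, q ≠ [] ∧ pvLOk q ∧ pvROk q := by
        intro q hq
        exact pvParts_mem ls q (hps ▸ hq)
      have hA : (pvBodyA ls).toList = ' ' :: PySem.Chars.join [' '] (p :: rest) := by
        rw [pvBodyA, String.toList_ofList, hps, flatten_space_join]
      have hB : (pvBody ls).toList = PySem.Chars.join [' '] (p :: rest) := by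
        rw [pvBody_toList, hps]
      have hpne : p ≠ [] := (hmem p (by simp)).1
      have hjne : PySem.Chars.join [' '] (p :: rest) ≠ [] := join_ne p rest hpne
      refine ⟨?_, ?_, ?_⟩
      · intro h
        rw [← String.toList_inj, hA] at h
        simp at h
      · intro h
        rw [← String.toList_inj, hB] at h
        exact hjne (by simpa using h)
      · apply String.toList_inj.mp
        rw [PySem.Str.toList_strip, hA, hB]
        apply strip_space_cons
        · intro c hc
          rw [join_head? p rest hpne] at hc
          exact (hmem p (by simp)).2.1 c hc
        · obtain ⟨r, hr, hlast⟩ := join_getLast? (p :: rest) (fun q hq => (hmem q hq).1) (by simp)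
          intro c hc
          rw [hlast] at hc
          exact (hmem r hr).2.2 c hc

-- ===== VERDICT (by name: the statement is the Claim_ definition above) =====
theorem strip_headers_spec : Claim_equal_strip_headers := by
  intro request _
  unfold Spec_strip_headers strip_headers strip_headers_alt
  cases PySem.Str.split? request "\n" with
  | none => rfl
  | some lines =>
      cases lines with
      | nil => rfl
      | cons line0 tail =>
          simp only
          cases hf : tail.findIdx? pvIsBlank with
          | none =>
              rw [foldl_loopA_notfound tail hf]
              simp
          | some i =>
              rw [foldl_loopA_split tail i hf, foldl_loopA_found]
              rcases body_identity (tail.drop (i + 1)) with ⟨h1, h2⟩ | ⟨h1, h2, h3⟩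
              · simp [h1, h2]
              · have : ("" : String) ++ pvBodyA (tail.drop (i + 1)) = pvBodyA (tail.drop (i + 1)) := by
                  apply String.toList_inj.mp; simp
                rw [this]
                simp [h1, h2, h3]
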